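-- pv_equiv track=rewrite | github.com/karrlopezz/dsc20_HW | hw02.py | dict_of_names
-- ===== SOURCE A (Python) =====
-- def dict_of_names(name_tuples):
--     """
--     Dictionary containing given names of team and all their preffered
--     names.
--     --
--     Parameters:
--     name_tuples: tuples containing team members given name and their
--     preffered name. May contain tuple with the same given name.
--     --
--     Returns:
--     Dictionary containing the unique given name keys and their values
--     being all of the preffered names given to that key/given name.
--     --
--
--     >>> dict_of_names([('Richard', 'Rick'),
--     ... ('Roxanne', 'Rose'), ('Roxanne', 'Ann'),
--     ... ('Richard', 'Ricky'), ('Roxanne', 'Roxie'),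
--     ... ('Mitchell', 'Mitch')])
--     {'Richard': ['Rick', 'Ricky'], 'Roxanne': ['Rose', 'Ann', 'Roxie'], \
-- 'Mitchell': ['Mitch']}
--
--     >>> dict_of_names([('Melissa', 'Lisa'),
--     ... ('Isabel', 'Bella'), ('NO NAME PROVIDED', 'Faith')])
--     {'Melissa': ['Lisa'], 'Isabel': ['Bella'], \
-- 'NO NAME PROVIDED': ['Faith']}
--
--     >>> dict_of_names([('NO NAME PROVIDED', 'Derrick'), \
--     ('NO NAME PROVIDED', 'Jacob')])
--     {'NO NAME PROVIDED': ['Derrick', 'Jacob']}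
--
--     >>> dict_of_names([('Karina', 'Kari'), \
--     ('NO NAME PROVIDED', 'Angel')])
--     {'Karina': ['Kari'], 'NO NAME PROVIDED': ['Angel']}
--
--     >>> dict_of_names([('NO NAME PROVIDED', 'Ale'), \
--     ('NO NAME PROVIDED', 'Jacob'), ('no name provided', 'Kari')])
--     {'NO NAME PROVIDED': ['Ale', 'Jacob'], 'no name provided': ['Kari']}
--
--     >>> dict_of_names([('No NAME PROVIDED', 'Casey'), \
--     ('NO NAME PROVIDED', 'Jacob'), ('Katelyn', 'Kate')])
--     {'No NAME PROVIDED': ['Casey'], 'NO NAME PROVIDED': ['Jacob'], \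
-- 'Katelyn': ['Kate']}
--     """
--     new_dict = dict()
--     for name, prefname in name_tuples:
--         if name in new_dict:
--             new_dict[name].append(prefname)
--         else:
--             new_dict[name] = [prefname]
--     return new_dict
-- ===== SOURCE B (Python) =====
-- def dict_of_names(name_tuples):
--     keys = []
--     for name, _ in name_tuples:
--         if name not in keys:
--             keys.append(name)
--     return {k: [pref for name, pref in name_tuples if name == k]
--             for k in keys}
-- ===== Notes on version B (the rewrite author's own statement) =====
-- stated objective: alternative
-- what changed: Replaces the single grouping pass that mutates per-key lists in a dict with a collect-unique-keys pass followed by a per-key comprehension over the whole input.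
import Mathlib
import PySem

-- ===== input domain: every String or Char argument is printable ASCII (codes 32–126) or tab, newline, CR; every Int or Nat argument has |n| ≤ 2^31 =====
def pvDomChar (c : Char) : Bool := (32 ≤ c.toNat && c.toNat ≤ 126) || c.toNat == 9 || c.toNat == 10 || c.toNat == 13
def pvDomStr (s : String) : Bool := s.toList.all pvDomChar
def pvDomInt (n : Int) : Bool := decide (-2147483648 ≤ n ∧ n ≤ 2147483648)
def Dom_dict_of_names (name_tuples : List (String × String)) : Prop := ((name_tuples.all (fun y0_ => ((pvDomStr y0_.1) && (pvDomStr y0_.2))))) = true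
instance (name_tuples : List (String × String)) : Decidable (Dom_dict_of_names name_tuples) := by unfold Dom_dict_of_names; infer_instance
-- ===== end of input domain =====

-- B groups by first collecting the unique given names, then gathering each key's preferred
-- names by a separate scan of the input (same keys, order and values as A's one-pass dict build).

-- ===== PORT A =====
-- A: one pass over name_tuples, appending to the key's list if present, else inserting [prefname].
def dict_of_names (name_tuples : List (String × String)) : List (String × List String) :=
  (name_tuples.foldl
    (fun d p =>
      if d.contains p.1 then d.modify p.1 [] (fun l => l ++ [p.2])
      else d.insert p.1 [p.2])
    PySem.Dict.empty).items

-- ===== PORT B =====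
-- B: collect unique given names in first-appearance order, then build each value list
-- by filtering the whole input for that key.
def dict_of_names_alt (name_tuples : List (String × String)) : List (String × List String) :=
  let keys := name_tuples.foldl
    (fun ks p => if ks.contains p.1 then ks else ks ++ [p.1]) []
  keys.map (fun k => (k, (name_tuples.filter (fun p => p.1 == k)).map (fun p => p.2)))

-- ===== PRECONDITION & SPEC =====
def Spec_dict_of_names (name_tuples : List (String × String)) (out : List (String × List String)) : Prop := out = dict_of_names_alt name_tuples
instance (name_tuples : List (String × String)) (out : List (String × List String)) : Decidable (Spec_dict_of_names name_tuples out) := by unfold Spec_dict_of_names; infer_instance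

-- ===== CLAIM =====
def Claim_equal_dict_of_names : Prop := ∀ (name_tuples : List (String × String)), Dom_dict_of_names name_tuples → Spec_dict_of_names name_tuples (dict_of_names name_tuples)

-- ===== LEMMAS AND PROOFS =====

-- A's branch collapses to an unconditional modify: inserting [v] at a fresh key is modify with default [].
theorem modify_of_not_contains {κ ν : Type} [BEq κ] [LawfulBEq κ]
    (d : PySem.Dict κ ν) (k : κ) (v : ν) (f : ν → ν)
    (h : d.contains k = false) :
    d.modify k v f = d.insert k (f v) := by
  have h2 : d.get? k = none := by
    rw [PySem.Dict.get?_eq_none_iff_contains]; exact h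
  simp [PySem.Dict.modify, PySem.Dict.getD_eq_get?_getD, h2]

theorem dictA_eq_modify_fold (name_tuples : List (String × String)) :
    (name_tuples.foldl
      (fun d p =>
        if d.contains p.1 then d.modify p.1 [] (fun l => l ++ [p.2])
        else d.insert p.1 [p.2])
      PySem.Dict.empty)
    = name_tuples.foldl (fun d p => d.modify p.1 [] (fun l => l ++ [p.2])) PySem.Dict.empty := by
  congr 1
  funext d p
  by_cases h : d.contains p.1
  · simp [h]
  · simp only [Bool.not_eq_true] at h
    simp [h, modify_of_not_contains d p.1 [] (fun l => l ++ [p.2]) h]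

-- B's key-collection fold is Set.update [] of the first components.
theorem keysB_eq_set_update (name_tuples : List (String × String)) :
    name_tuples.foldl (fun ks p => if ks.contains p.1 then ks else ks ++ [p.1]) []
    = PySem.Set.update [] (name_tuples.map (fun p => p.1)) := by
  simp [PySem.Set.update, PySem.Set.add, List.foldl_map]

theorem dict_of_names_spec' (name_tuples : List (String × String)) :
    dict_of_names name_tuples = dict_of_names_alt name_tuples := by
  unfold dict_of_names dict_of_names_alt
  rw [dictA_eq_modify_fold, keysB_eq_set_update]
  rw [PySem.Dict.items_eq_map_keys _
        (PySem.Dict.nodup_keys_foldl_modify_key name_tuples (fun p => p.1) []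
          (fun _ p => fun l => l ++ [p.2]) PySem.Dict.empty PySem.Dict.nodup_keys_empty) []]
  rw [PySem.Dict.keys_foldl_modify_key]
  simp only [PySem.Dict.keys_empty]
  apply List.map_congr_left
  intro k _
  rw [PySem.Dict.getD_foldl_modify_append]
  simp [PySem.Dict.getD_empty]

-- ===== VERDICT =====
theorem dict_of_names_spec : Claim_equal_dict_of_names := by
  intro nts _
  exact dict_of_names_spec' nts
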